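-- pv_equiv track=rewrite | github.com/swazara/bioinformatics-active-learning | Chapter 1/Find DnaA boxes in Salmonella enterica/BA1/BA1e/ClumpFinder.py | find_clumps
-- ===== SOURCE A (Python) =====
-- from collections import defaultdict
--
-- def get_frequency_table(text, k):
--     #Creates a map of k-mers with the list of their starting positions.
--     freq_map = defaultdict(list)
--     for i in range(len(text) - k + 1):
--         pattern = text[i : i + k]
--         freq_map[pattern].append(i)
--     return freq_map
--
-- def find_clumps(sequence, k, l_window, t):
--     #Finds all k-mers that form a (k, L, t)-clump in the sequence.
--     kmers_positions = get_frequency_table(sequence, k)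
--     clumps = []
--
--     for kmer, positions in kmers_positions.items():
--         if len(positions) >= t:
--             for i in range(len(positions) - t + 1):
--                 distance = positions[i + t - 1] - positions[i]
--
--                 if distance <= l_window - k:
--                     clumps.append(kmer)
--                     break
--
--     return clumps
-- ===== SOURCE B (Python) =====
-- def find_clumps(sequence, k, l_window, t):
--     # One-pass streaming scan. For each k-mer keep its full position list plus a
--     # sliding start pointer so that positions[start:] are its (at most) t most
--     # recent occurrences; the k-mer qualifies the first time those t positions
--     # span at most l_window - k. Output is in first-occurrence order.
--     limit = l_window - k
--     recent = {}       # kmer -> [start, positions]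
--     order = []        # kmers in first-occurrence order
--     qualifying = set()
--     for i in range(len(sequence) - k + 1):
--         kmer = sequence[i : i + k]
--         entry = recent.get(kmer)
--         if entry is None:
--             order.append(kmer)
--             entry = recent[kmer] = [0, []]
--         positions = entry[1]
--         positions.append(i)
--         if len(positions) - entry[0] > t:
--             entry[0] += 1
--         if len(positions) - entry[0] == t and i - positions[entry[0]] <= limit:
--             qualifying.add(kmer)
--     return [kmer for kmer in order if kmer in qualifying]
-- ===== Notes on version B (the rewrite author's own statement) =====
-- stated objective: alternative
-- what changed: B replaces A's two-phase algorithm (build a dict of full position lists, then re-scan each k-mer's list for a window of t occurrences spanning <= l_window-k) by a single streaming pass with a per-k-mer sliding start pointer marking its t most recent occurrences: a k-mer is recorded as qualifying the moment those t positions span at most l_window-k, and first-occurrence order is emitted directly.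
-- outside the precondition, e.g. on find_clumps('AC', 1, 5, 0): A returns ['A', 'C'], B raises IndexError
import Mathlib
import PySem

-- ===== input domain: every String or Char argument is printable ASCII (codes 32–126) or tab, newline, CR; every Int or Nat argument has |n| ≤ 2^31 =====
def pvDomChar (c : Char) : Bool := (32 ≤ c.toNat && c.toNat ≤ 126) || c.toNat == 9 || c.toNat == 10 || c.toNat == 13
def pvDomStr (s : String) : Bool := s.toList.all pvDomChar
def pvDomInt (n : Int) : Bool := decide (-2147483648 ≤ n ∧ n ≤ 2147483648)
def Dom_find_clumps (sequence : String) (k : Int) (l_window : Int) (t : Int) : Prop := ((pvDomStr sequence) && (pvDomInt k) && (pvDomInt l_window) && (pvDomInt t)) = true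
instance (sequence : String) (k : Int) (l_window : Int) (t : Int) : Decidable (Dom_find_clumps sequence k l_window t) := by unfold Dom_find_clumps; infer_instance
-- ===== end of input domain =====

-- B is a single streaming pass that tracks, per k-mer, a sliding start pointer to its t most
-- recent positions (an alternative decomposition of A's build-table-then-rescan algorithm).

-- ===== PORT A =====
def get_frequency_table (text : String) (k : Int) : PySem.Dict String (List Int) :=
  (PySem.List.pyRange 0 (PySem.Str.len text - k + 1)).foldl
    (fun freq_map i =>
      freq_map.modify (PySem.Str.slice text (some i) (some (i + k))) [] (fun l => l ++ [i]))
    PySem.Dict.empty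

def find_clumps (sequence : String) (k : Int) (l_window : Int) (t : Int) : List String :=
  let kmers_positions := get_frequency_table sequence k
  -- inner 'for i in range(...): if distance <= l_window - k: clumps.append(kmer); break'
  -- appends kmer exactly once iff some i in the range satisfies the test: ported as .any
  kmers_positions.items.foldl
    (fun clumps kv =>
      if t ≤ (kv.2.length : Int) then
        if (PySem.List.pyRange 0 ((kv.2.length : Int) - t + 1)).any
             (fun i => decide (PySem.List.pyGetD kv.2 (i + t - 1) 0 - PySem.List.pyGetD kv.2 i 0 ≤ l_window - k))
        then clumps ++ [kv.1] else clumps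
      else clumps)
    []

-- ===== PORT B =====
-- Python's in-place 'entry[0] += 1' / 'positions.append(i)' on the mutable entry is ported by
-- re-inserting the updated (start, positions) pair at the same key (insert keeps the key's position).
def find_clumps_alt (sequence : String) (k : Int) (l_window : Int) (t : Int) : List String :=
  let limit := l_window - k
  let st :=
    (PySem.List.pyRange 0 (PySem.Str.len sequence - k + 1)).foldl
      (fun (st : PySem.Dict String (Int × List Int) × List String × PySem.Set String) i =>
        let kmer := PySem.Str.slice sequence (some i) (some (i + k))
        let entry := if st.1.contains kmer then st.1.getD kmer (0, []) else ((0 : Int), ([] : List Int))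
        let order := if st.1.contains kmer then st.2.1 else st.2.1 ++ [kmer]
        let positions := entry.2 ++ [i]
        let start := if t < (positions.length : Int) - entry.1 then entry.1 + 1 else entry.1
        let recent := st.1.insert kmer (start, positions)
        let qualifying :=
          if (positions.length : Int) - start = t ∧
             i - PySem.List.pyGetD positions start 0 ≤ limit
          then st.2.2.add kmer else st.2.2
        (recent, order, qualifying))
      (PySem.Dict.empty, [], PySem.Set.empty)
  st.2.1.filter (fun kmer => st.2.2.contains kmer)

-- ===== PRECONDITION & SPEC =====
-- Pre_ excludes t ≤ 0 on sequences that contain at least one k-mer: there A's positions[i + t - 1]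
-- is a negative index, an accident of Python's negative-index wraparound, and A raises IndexError on
-- part of those inputs (B raises there too); when the sequence has no k-mer both trivially return [].
def Pre_find_clumps (sequence : String) (k : Int) (l_window : Int) (t : Int) : Prop :=
  1 ≤ t ∨ PySem.Str.len sequence - k + 1 ≤ 0
instance (sequence : String) (k : Int) (l_window : Int) (t : Int) : Decidable (Pre_find_clumps sequence k l_window t) := by unfold Pre_find_clumps; infer_instance

def pvWitness_find_clumps : String × Int × Int × Int := ("ABAB", 1, 3, 2)

def Spec_find_clumps (sequence : String) (k : Int) (l_window : Int) (t : Int) (out : List String) : Prop := out = find_clumps_alt sequence k l_window t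
instance (sequence : String) (k : Int) (l_window : Int) (t : Int) (out : List String) : Decidable (Spec_find_clumps sequence k l_window t out) := by unfold Spec_find_clumps; infer_instance

-- ===== CLAIM (what is proved, stated in full; the proofs are below) =====
def Claim_equal_find_clumps : Prop := ∀ (sequence : String) (k : Int) (l_window : Int) (t : Int), Dom_find_clumps sequence k l_window t → Pre_find_clumps sequence k l_window t → Spec_find_clumps sequence k l_window t (find_clumps sequence k l_window t)

-- ===== LEMMAS AND PROOFS =====

def pvP (L : List (String × Int)) (c : String) : List Int :=
  (L.filter (fun p => p.1 == c)).map (fun p => p.2)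

def pvW (t limit : Int) (xs : List Int) : Bool :=
  (PySem.List.pyRange 0 ((xs.length : Int) - t + 1)).any
    (fun i => decide (PySem.List.pyGetD xs (i + t - 1) 0 - PySem.List.pyGetD xs i 0 ≤ limit))

def pvTrim (t : Int) (xs : List Int) : List Int := xs.drop (xs.length - t.toNat)

-- start pointer: positions[start:] are the at most t most recent occurrences
def pvStart (t : Int) (xs : List Int) : Int := ((xs.length - t.toNat : Nat) : Int)

-- B's loop body, on a precomputed (kmer, position) pair
def pvStep (t limit : Int)
    (st : PySem.Dict String (Int × List Int) × List String × PySem.Set String)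
    (p : String × Int) :
    PySem.Dict String (Int × List Int) × List String × PySem.Set String :=
  (st.1.insert p.1
    ((if t < (((if st.1.contains p.1 then st.1.getD p.1 (0, []) else ((0 : Int), ([] : List Int))).2
          ++ [p.2]).length : Int) -
            (if st.1.contains p.1 then st.1.getD p.1 (0, []) else ((0 : Int), ([] : List Int))).1
      then (if st.1.contains p.1 then st.1.getD p.1 (0, []) else ((0 : Int), ([] : List Int))).1 + 1
      else (if st.1.contains p.1 then st.1.getD p.1 (0, []) else ((0 : Int), ([] : List Int))).1),
     (if st.1.contains p.1 then st.1.getD p.1 (0, []) else ((0 : Int), ([] : List Int))).2 ++ [p.2]),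
   (if st.1.contains p.1 then st.2.1 else st.2.1 ++ [p.1]),
   (if (((if st.1.contains p.1 then st.1.getD p.1 (0, []) else ((0 : Int), ([] : List Int))).2
          ++ [p.2]).length : Int) -
          (if t < (((if st.1.contains p.1 then st.1.getD p.1 (0, []) else ((0 : Int), ([] : List Int))).2
              ++ [p.2]).length : Int) -
                (if st.1.contains p.1 then st.1.getD p.1 (0, []) else ((0 : Int), ([] : List Int))).1
            then (if st.1.contains p.1 then st.1.getD p.1 (0, []) else ((0 : Int), ([] : List Int))).1 + 1
            else (if st.1.contains p.1 then st.1.getD p.1 (0, []) else ((0 : Int), ([] : List Int))).1) = t ∧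
       p.2 - PySem.List.pyGetD
          ((if st.1.contains p.1 then st.1.getD p.1 (0, []) else ((0 : Int), ([] : List Int))).2 ++ [p.2])
          (if t < (((if st.1.contains p.1 then st.1.getD p.1 (0, []) else ((0 : Int), ([] : List Int))).2
              ++ [p.2]).length : Int) -
                (if st.1.contains p.1 then st.1.getD p.1 (0, []) else ((0 : Int), ([] : List Int))).1
            then (if st.1.contains p.1 then st.1.getD p.1 (0, []) else ((0 : Int), ([] : List Int))).1 + 1
            else (if st.1.contains p.1 then st.1.getD p.1 (0, []) else ((0 : Int), ([] : List Int))).1) 0 ≤ limit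
    then st.2.2.add p.1 else st.2.2))
def pvInv (t limit : Int) (pre : List (String × Int))
    (st : PySem.Dict String (Int × List Int) × List String × PySem.Set String) : Prop :=
  (∀ c, st.1.contains c = decide (c ∈ pre.map (fun p => p.1))) ∧
  (∀ c, st.1.getD c (0, []) = (pvStart t (pvP pre c), pvP pre c)) ∧
  st.2.1 = PySem.Set.ofList (pre.map (fun p => p.1)) ∧
  (∀ c, c ∈ st.2.2 ↔ pvW t limit (pvP pre c) = true)

lemma pvP_append_singleton (L : List (String × Int)) (p : String × Int) (c : String) :
    pvP (L ++ [p]) c = pvP L c ++ (if p.1 == c then [p.2] else []) := by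
  by_cases h : p.1 == c <;> simp [pvP, List.filter_append, h]

lemma pvP_nil_of_not_mem {L : List (String × Int)} {c : String}
    (h : c ∉ L.map (fun p => p.1)) : pvP L c = [] := by
  simp only [pvP, List.map_eq_nil_iff, List.filter_eq_nil_iff]
  intro p hp hbeq
  exact h (List.mem_map.mpr ⟨p, hp, by simpa using hbeq⟩)

lemma pvGetD_append_left (xs : List Int) (x d : Int) (m : Int)
    (h0 : 0 ≤ m) (h1 : m < (xs.length : Int)) :
    PySem.List.pyGetD (xs ++ [x]) m d = PySem.List.pyGetD xs m d := by
  have hm : m = ((m.toNat : Nat) : Int) := by omega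
  rw [hm, PySem.List.pyGetD_natCast, PySem.List.pyGetD_natCast]
  exact List.getD_append xs [x] d m.toNat (by omega)

lemma pvGetD_drop_zero (xs : List Int) (n : Nat) (d : Int) :
    (xs.drop n).getD 0 d = xs.getD n d := by
  simp [List.getD_eq_getElem?_getD, List.getElem?_drop]

lemma pvGetD_append_last (xs : List Int) (x d : Int) :
    (xs ++ [x]).getD xs.length d = x := by
  simp [List.getD_eq_getElem?_getD]

lemma pvW_le_length {t limit : Int} {xs : List Int} (hW : pvW t limit xs = true) :
    t ≤ (xs.length : Int) := by
  rcases List.any_eq_true.mp hW with ⟨j, hj, -⟩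
  have := PySem.List.mem_pyRange_one.mp hj
  omega

lemma pvStart_step {t : Int} (ht : 1 ≤ t) (xs : List Int) (i : Int) :
    (if t < (((xs ++ [i]).length : Nat) : Int) - pvStart t xs then pvStart t xs + 1 else pvStart t xs)
      = pvStart t (xs ++ [i]) := by
  simp only [pvStart, List.length_append, List.length_cons, List.length_nil]
  split_ifs <;> omega

lemma pvCond_iff {t : Int} (ht : 1 ≤ t) (ys : List Int) (i limit : Int) :
    ((((ys.length : Nat) : Int) - pvStart t ys = t ∧
        i - PySem.List.pyGetD ys (pvStart t ys) 0 ≤ limit) ↔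
      (((pvTrim t ys).length : Int) = t ∧
        i - PySem.List.pyGetD (pvTrim t ys) 0 0 ≤ limit)) := by
  have hget : PySem.List.pyGetD ys (pvStart t ys) 0 = PySem.List.pyGetD (pvTrim t ys) 0 0 := by
    rw [pvStart, PySem.List.pyGetD_natCast, pvTrim, PySem.List.pyGetD_zero, pvGetD_drop_zero]
  rw [hget]
  have hlen : (pvTrim t ys).length = ys.length - (ys.length - t.toNat) := by
    simp [pvTrim]
  constructor
  · rintro ⟨h1, h2⟩
    refine ⟨?_, h2⟩
    simp only [pvStart] at h1
    omega
  · rintro ⟨h1, h2⟩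
    refine ⟨?_, h2⟩
    rw [hlen] at h1
    simp only [pvStart]
    omega

lemma pvW_step {t limit : Int} (ht : 1 ≤ t) (xs : List Int) (i : Int) :
    (pvW t limit (xs ++ [i]) = true ↔
      (pvW t limit xs = true ∨
        (((pvTrim t (xs ++ [i])).length : Int) = t ∧
          i - PySem.List.pyGetD (pvTrim t (xs ++ [i])) 0 0 ≤ limit))) := by
  have ht' : t = ((t.toNat : Nat) : Int) := by omega
  by_cases hc : xs.length + 1 < t.toNat
  · constructor
    · intro hW
      rcases List.any_eq_true.mp hW with ⟨j, hj, -⟩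
      have := PySem.List.mem_pyRange_one.mp hj
      simp only [List.length_append, List.length_cons, List.length_nil] at this
      omega
    · rintro (hW | ⟨hl, -⟩)
      · rcases List.any_eq_true.mp hW with ⟨j, hj, -⟩
        have := PySem.List.mem_pyRange_one.mp hj
        omega
      · exfalso
        simp only [pvTrim, List.length_drop, List.length_append, List.length_cons,
          List.length_nil] at hl
        omega
  · -- t.toNat ≤ xs.length + 1
    have hlen : ((xs ++ [i]).length : Int) = (xs.length : Int) + 1 := by simp
    have htrimlen : (pvTrim t (xs ++ [i])).length = t.toNat := by
      simp only [pvTrim, List.length_drop, List.length_append, List.length_cons,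
        List.length_nil]
      omega
    have hhead : PySem.List.pyGetD (pvTrim t (xs ++ [i])) 0 0
        = (xs ++ [i]).getD (xs.length + 1 - t.toNat) 0 := by
      rw [PySem.List.pyGetD_zero, pvTrim]
      rw [pvGetD_drop_zero]
      congr 1
      simp
    unfold pvW
    rw [hlen, show (xs.length : Int) + 1 - t + 1 = ((xs.length : Int) - t + 1) + 1 from by ring,
      PySem.List.pyRange_one_succ_right (by omega), List.any_append]
    rw [PySem.List.any_congr_mem (g := fun j => decide
      (PySem.List.pyGetD xs (j + t - 1) 0 - PySem.List.pyGetD xs j 0 ≤ limit))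
      (fun j hj => by
        have hb := PySem.List.mem_pyRange_one.mp hj
        rw [pvGetD_append_left xs i 0 (j + t - 1) (by omega) (by omega),
          pvGetD_append_left xs i 0 j (by omega) (by omega)])]
    have hlast : PySem.List.pyGetD (xs ++ [i]) ((xs.length : Int) - t + 1 + t - 1) 0 = i := by
      rw [show (xs.length : Int) - t + 1 + t - 1 = ((xs.length : Nat) : Int) from by ring,
        PySem.List.pyGetD_natCast, pvGetD_append_last]
    have hsnd : PySem.List.pyGetD (xs ++ [i]) ((xs.length : Int) - t + 1) 0
        = (xs ++ [i]).getD (xs.length + 1 - t.toNat) 0 := by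
      rw [show (xs.length : Int) - t + 1 = ((xs.length + 1 - t.toNat : Nat) : Int) from by omega,
        PySem.List.pyGetD_natCast]
    simp only [List.any_cons, List.any_nil, Bool.or_false, Bool.or_eq_true,
      decide_eq_true_eq, hlast, hsnd, htrimlen, hhead]
    constructor
    · rintro (h | h)
      · exact Or.inl h
      · exact Or.inr ⟨by omega, h⟩
    · rintro (h | ⟨-, h⟩)
      · exact Or.inl h
      · exact Or.inr h

lemma pvStep_inv {t limit : Int} (ht : 1 ≤ t) (pre : List (String × Int))
    (st : PySem.Dict String (Int × List Int) × List String × PySem.Set String)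
    (h : pvInv t limit pre st) (p : String × Int) :
    pvInv t limit (pre ++ [p]) (pvStep t limit st p) := by
  obtain ⟨d, ord, qual⟩ := st
  obtain ⟨c₀, i₀⟩ := p
  obtain ⟨hcont, hgetD, hord, hqual⟩ := h
  simp only at hcont hgetD hord hqual
  -- the entry held for c₀ before this step
  have hd1 : (if d.contains c₀ then d.getD c₀ (0, []) else ((0 : Int), ([] : List Int)))
      = (pvStart t (pvP pre c₀), pvP pre c₀) := by
    by_cases hc0 : d.contains c₀
    · rw [if_pos hc0]; exact hgetD c₀
    · rw [if_neg hc0]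
      have hc0' : d.contains c₀ = false := by simpa using hc0
      have hnm : c₀ ∉ pre.map (fun p => p.1) := by
        have := hcont c₀; rw [hc0'] at this
        exact of_decide_eq_false this.symm
      rw [pvP_nil_of_not_mem hnm]
      simp only [pvStart, List.length_nil, Nat.zero_sub, Nat.cast_zero]
  have hP' : pvP (pre ++ [(c₀, i₀)]) c₀ = pvP pre c₀ ++ [i₀] := by
    rw [pvP_append_singleton]; simp
  refine ⟨?_, ?_, ?_, ?_⟩
  · -- contains
    intro c
    simp only [pvStep, PySem.Dict.contains_insert]
    by_cases hcc : c = c₀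
    · simp [hcc]
    · have : (c == c₀) = false := by simp [hcc]
      rw [this, hcont c]
      simp [hcc]
  · -- getD
    intro c
    simp only [pvStep, PySem.Dict.getD_insert]
    by_cases hcc : c = c₀
    · rw [if_pos hcc, hcc, hP', hd1]
      rw [Prod.mk.injEq]
      exact ⟨pvStart_step ht _ _, rfl⟩
    · rw [if_neg hcc]
      have h2 : pvP (pre ++ [(c₀, i₀)]) c = pvP pre c := by
        rw [pvP_append_singleton]
        simp [show ¬ (c₀ = c) from fun h => hcc h.symm]
      rw [h2, hgetD c]
  · -- order
    simp only [pvStep, List.map_append, List.map_cons, List.map_nil]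
    rw [PySem.Set.ofList_eq_foldl, List.foldl_append, ← PySem.Set.ofList_eq_foldl]
    simp only [List.foldl_cons, List.foldl_nil]
    rw [hcont c₀, hord]
    show _ = PySem.Set.add (PySem.Set.ofList (pre.map fun p => p.1)) c₀
    by_cases hm : c₀ ∈ pre.map (fun p => p.1)
    · rw [if_pos (by simpa using hm)]
      unfold PySem.Set.add
      rw [if_pos (by rw [PySem.Set.contains_eq_decide]; simpa using (PySem.Set.mem_ofList _ _).mpr hm)]
    · rw [if_neg (by simpa using hm)]
      unfold PySem.Set.add
      rw [if_neg (by rw [PySem.Set.contains_eq_decide]; simp only [decide_eq_true_eq, PySem.Set.mem_ofList]; simpa using hm)]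
  · -- qualifying
    intro c
    simp only [pvStep, hd1]
    rw [pvStart_step ht (pvP pre c₀) i₀]
    by_cases hcc : c = c₀
    · subst hcc
      rw [hP', pvW_step ht]
      rw [← pvCond_iff ht (pvP pre c ++ [i₀]) i₀ limit, ← hP']
      by_cases hcond : ((pvP (pre ++ [(c, i₀)]) c).length : Int) - pvStart t (pvP (pre ++ [(c, i₀)]) c) = t ∧
          i₀ - PySem.List.pyGetD (pvP (pre ++ [(c, i₀)]) c) (pvStart t (pvP (pre ++ [(c, i₀)]) c)) 0 ≤ limit
      · rw [if_pos (by rw [hP'] at hcond ⊢; exact hcond)]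
        rw [PySem.Set.mem_add]
        constructor
        · intro _; right; exact hcond
        · intro _; right; rfl
      · rw [if_neg (by rw [hP'] at hcond ⊢; exact hcond)]
        rw [hqual c]
        constructor
        · intro h; left; exact h
        · rintro (h | h)
          · exact h
          · exact absurd h hcond
    · have h2 : pvP (pre ++ [(c₀, i₀)]) c = pvP pre c := by
        rw [pvP_append_singleton]
        simp [show ¬ (c₀ = c) from fun h => hcc h.symm]
      rw [h2, ← hqual c]
      split
      · rw [PySem.Set.mem_add]
        constructor
        · rintro (h | h)
          · exact h
          · exact absurd h hcc
        · intro h; left; exact h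
      · exact Iff.rfl

lemma pvFoldl_inv {t limit : Int} (ht : 1 ≤ t) (L : List (String × Int)) :
    ∀ (pre : List (String × Int)) st, pvInv t limit pre st →
      pvInv t limit (pre ++ L) (L.foldl (pvStep t limit) st) := by
  induction L with
  | nil => intro pre st h; simpa using h
  | cons p L ih =>
      intro pre st h
      have := ih (pre ++ [p]) (pvStep t limit st p) (pvStep_inv ht pre st h p)
      simpa using this

lemma pvInv_init {t : Int} (limit : Int) (ht : 1 ≤ t) :
    pvInv t limit [] (PySem.Dict.empty, [], PySem.Set.empty) := by
  refine ⟨?_, ?_, ?_, ?_⟩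
  · intro c; simp [PySem.Dict.contains_empty]
  · intro c; simp [PySem.Dict.getD_empty, pvP, pvStart]
  · rfl
  · intro c
    constructor
    · intro h; cases h
    · intro h
      have h0 : pvP [] c = [] := by simp [pvP]
      rw [h0] at h
      have := pvW_le_length h
      simp at this
      omega

-- ===== VERDICT (by name: the statement is the Claim_ definition above) =====
-- the dict-building loop, re-indexed over (k-mer, position) pairs
lemma pvGfold (sequence : String) (k : Int) :
    get_frequency_table sequence k
      = ((PySem.List.pyRange 0 (PySem.Str.len sequence - k + 1)).map
          (fun i => (PySem.Str.slice sequence (some i) (some (i + k)), i))).foldl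
          (fun d p => d.modify p.1 [] (fun l => l ++ [p.2])) PySem.Dict.empty := by
  rw [List.foldl_map]; rfl

lemma pvA_eq (sequence : String) (k l_window t : Int) :
    find_clumps sequence k l_window t =
      (get_frequency_table sequence k).keys.filter
        (fun c => decide (t ≤ (((get_frequency_table sequence k).getD c []).length : Int) ∧
          pvW t (l_window - k) ((get_frequency_table sequence k).getD c []) = true)) := by
  have hnodup : (get_frequency_table sequence k).keys.Nodup := by
    rw [pvGfold]
    exact PySem.Dict.nodup_keys_foldl_modify_key _ _ _ _ _ PySem.Dict.nodup_keys_empty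
  unfold find_clumps
  rw [PySem.List.foldl_congr_mem _ _
    (fun clumps kv => if t ≤ ((kv.2.length : Nat) : Int) ∧ pvW t (l_window - k) kv.2 = true
      then clumps ++ [kv.1] else clumps) _
    (by
      intro acc kv _
      simp only [pvW]
      split_ifs with h1 h2 h3 h4 h5 <;> try rfl
      · exact absurd ⟨h1, h2⟩ h3
      · exact absurd h4.2 h2
      · exact absurd h5.1 h1)]
  rw [PySem.List.foldl_append_ite
    (p := fun kv : String × List Int => t ≤ ((kv.2.length : Nat) : Int) ∧ pvW t (l_window - k) kv.2 = true)
    (f := fun kv => kv.1)]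
  rw [PySem.Dict.items_eq_map_keys _ hnodup []]
  rw [List.filter_map, List.map_map]
  simp [Function.comp_def]

theorem find_clumps_spec : Claim_equal_find_clumps := by
  intro sequence k l_window t _hDom hpre
  show find_clumps sequence k l_window t = find_clumps_alt sequence k l_window t
  rcases (id hpre : (1 : Int) ≤ t ∨ PySem.Str.len sequence - k + 1 ≤ 0) with ht | hemp
  case inr =>
    -- no k-mer at all: both loops run over an empty range and return []
    have hr : PySem.List.pyRange 0 (PySem.Str.len sequence - k + 1) = [] := by
      apply List.eq_nil_iff_forall_not_mem.mpr
      intro x hx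
      have := PySem.List.mem_pyRange_one.mp hx
      omega
    unfold find_clumps find_clumps_alt get_frequency_table
    rw [hr]
    rfl
  show find_clumps sequence k l_window t = find_clumps_alt sequence k l_window t
  set L := (PySem.List.pyRange 0 (PySem.Str.len sequence - k + 1)).map
      (fun i => (PySem.Str.slice sequence (some i) (some (i + k)), i)) with hL
  have hGfold : get_frequency_table sequence k
      = L.foldl (fun d p => d.modify p.1 [] (fun l => l ++ [p.2])) PySem.Dict.empty :=
    pvGfold sequence k
  have hgetD : ∀ c, (get_frequency_table sequence k).getD c [] = pvP L c := by
    intro c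
    rw [hGfold, PySem.Dict.getD_foldl_modify_append, PySem.Dict.getD_empty]
    simp [pvP]
  have hkeys : (get_frequency_table sequence k).keys
      = PySem.Set.ofList (L.map (fun p => p.1)) := by
    rw [hGfold, PySem.Dict.keys_foldl_modify_key, PySem.Dict.keys_empty]
    rfl
  have hB : find_clumps_alt sequence k l_window t =
      (L.foldl (pvStep t (l_window - k)) (PySem.Dict.empty, [], PySem.Set.empty)).2.1.filter
        (fun c => (L.foldl (pvStep t (l_window - k))
          (PySem.Dict.empty, [], PySem.Set.empty)).2.2.contains c) := by
    unfold find_clumps_alt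
    rw [hL, List.foldl_map]
    rfl
  have hInvAll := pvFoldl_inv (limit := l_window - k) ht L []
      (PySem.Dict.empty, [], PySem.Set.empty) (pvInv_init (l_window - k) ht)
  rw [List.nil_append] at hInvAll
  obtain ⟨-, -, ho, hq⟩ := hInvAll
  rw [pvA_eq, hB, hkeys, ← ho]
  apply List.filter_congr
  intro c _
  rw [PySem.Set.contains_eq_decide, hgetD c]
  apply decide_eq_decide.mpr
  constructor
  · rintro ⟨-, hW⟩
    exact (hq c).mpr hW
  · intro hm
    have hW := (hq c).mp hm
    exact ⟨pvW_le_length hW, hW⟩
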